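-- pv_equiv track=rewrite | github.com/nooblk-98/status-page | .github/scripts/commit/rewrite_commit_message.py | infer_fallback_subject
-- ===== SOURCE A (Python) =====
-- def infer_fallback_subject(files: list[str]) -> str:
--     if not files:
--         return "chore: improve commit message quality for repository updates"
--
--     docs_only = all(file.endswith(".md") or file.startswith("docs/") for file in files)
--     has_ci = any(file.startswith(".github/") for file in files)
--     has_tests = any(
--         file.startswith("test/")
--         or file.startswith("tests/")
--         or file.endswith(".spec.js")
--         or file.endswith(".spec.ts")
--         or file.endswith(".test.js")
--         or file.endswith(".test.ts")
--         for file in files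
--     )
--     has_app_code = any(
--         file.startswith("server/")
--         or file.startswith("public/")
--         or file.endswith(".js")
--         or file.endswith(".ts")
--         for file in files
--     )
--
--     if docs_only:
--         subject = "docs: expand documentation details for recent changes"
--     elif has_ci:
--         subject = "Refine automation to enforce better commit messages"
--     elif has_tests:
--         subject = "test: improve test coverage for recent code updates"
--     elif has_app_code:
--         subject = "feat: improve application behavior in updated modules"
--     else:
--         subject = "chore: organize and describe repository file updates"
--
--     first_file = files[0]
--     if len(first_file) <= 28:
--         suffix = f" ({first_file})"
--         if len(subject) + len(suffix) <= 72:
--             subject += suffix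
--
--     if len(subject) > 72:
--         subject = subject[:72].rstrip()
--
--     return subject
-- ===== SOURCE B (Python) =====
-- _SUBJECTS = [
--     "chore: organize and describe repository file updates",
--     "feat: improve application behavior in updated modules",
--     "test: improve test coverage for recent code updates",
--     "Refine automation to enforce better commit messages",
-- ]
--
-- def _rank(f):
--     # per-file priority: ci > tests > app code > other
--     if f.startswith(".github/"):
--         return 3
--     if f.startswith(("test/", "tests/")) or f.endswith((".spec.js", ".spec.ts", ".test.js", ".test.ts")):
--         return 2
--     if f.startswith(("server/", "public/")) or f.endswith((".js", ".ts")):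
--         return 1
--     return 0
--
-- def infer_fallback_subject(files: list[str]) -> str:
--     if not files:
--         return "chore: improve commit message quality for repository updates"
--
--     if any(not (f.endswith(".md") or f.startswith("docs/")) for f in files):
--         subject = _SUBJECTS[max(map(_rank, files))]
--     else:
--         subject = "docs: expand documentation details for recent changes"
--
--     first_file = files[0]
--     if len(first_file) <= 28:
--         suffix = f" ({first_file})"
--         if len(subject) + len(suffix) <= 72:
--             subject += suffix
--
--     if len(subject) > 72:
--         subject = subject[:72].rstrip()
--
--     return subject
-- ===== Notes on version B (the rewrite author's own statement) =====
-- stated objective: alternative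
-- what changed: Replaces A's four boolean list scans and if/elif chain with a numeric priority scheme: each file is mapped to a rank 0-3 (ci>tests>app>other) and the subject is looked up in a table indexed by the maximum rank, with a single docs-only check; suffix/truncation tail unchanged.
import Mathlib
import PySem

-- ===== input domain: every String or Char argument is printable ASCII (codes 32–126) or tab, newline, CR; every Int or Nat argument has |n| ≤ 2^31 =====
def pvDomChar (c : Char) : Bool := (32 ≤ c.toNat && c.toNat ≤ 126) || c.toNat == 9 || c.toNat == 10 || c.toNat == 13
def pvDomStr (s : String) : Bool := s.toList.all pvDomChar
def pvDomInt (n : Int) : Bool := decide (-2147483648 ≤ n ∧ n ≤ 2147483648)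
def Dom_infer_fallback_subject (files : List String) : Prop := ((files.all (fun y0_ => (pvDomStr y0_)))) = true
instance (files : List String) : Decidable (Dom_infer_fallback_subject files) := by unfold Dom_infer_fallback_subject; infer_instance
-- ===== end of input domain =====

-- B replaces A's four boolean scans and if/elif chain by a numeric priority rank per file
-- and a table lookup at the maximum rank (objective: alternative).

-- ===== PORT A =====
def infer_fallback_subject (files : List String) : String :=
  if files = [] then
    "chore: improve commit message quality for repository updates"
  else
    let docs_only := files.all (fun file => PySem.Str.endswith file ".md" || PySem.Str.startswith file "docs/")
    let has_ci := files.any (fun file => PySem.Str.startswith file ".github/")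
    let has_tests := files.any (fun file =>
      PySem.Str.startswith file "test/" || PySem.Str.startswith file "tests/" ||
      PySem.Str.endswith file ".spec.js" || PySem.Str.endswith file ".spec.ts" ||
      PySem.Str.endswith file ".test.js" || PySem.Str.endswith file ".test.ts")
    let has_app_code := files.any (fun file =>
      PySem.Str.startswith file "server/" || PySem.Str.startswith file "public/" ||
      PySem.Str.endswith file ".js" || PySem.Str.endswith file ".ts")
    let subject :=
      if docs_only then "docs: expand documentation details for recent changes"
      else if has_ci then "Refine automation to enforce better commit messages"
      else if has_tests then "test: improve test coverage for recent code updates"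
      else if has_app_code then "feat: improve application behavior in updated modules"
      else "chore: organize and describe repository file updates"
    let first_file := PySem.List.pyGetD files 0 ""
    let subject :=
      if PySem.Str.len first_file ≤ 28 then
        let suffix := PySem.Str.join "" [" (", first_file, ")"]
        if PySem.Str.len subject + PySem.Str.len suffix ≤ 72 then PySem.Str.join "" [subject, suffix]
        else subject
      else subject
    if PySem.Str.len subject > 72 then PySem.Str.rstrip (PySem.Str.slice subject none (some 72))
    else subject

-- ===== PORT B =====
def pvSubjects : List String :=
  ["chore: organize and describe repository file updates",
   "feat: improve application behavior in updated modules",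
   "test: improve test coverage for recent code updates",
   "Refine automation to enforce better commit messages"]

-- Source B's _rank: per-file priority, an if-chain returning 0..3
def pvRank (f : String) : Nat :=
  if PySem.Str.startswith f ".github/" then 3
  else if PySem.Str.startswith f "test/" || PySem.Str.startswith f "tests/" ||
          PySem.Str.endswith f ".spec.js" || PySem.Str.endswith f ".spec.ts" ||
          PySem.Str.endswith f ".test.js" || PySem.Str.endswith f ".test.ts" then 2
  else if PySem.Str.startswith f "server/" || PySem.Str.startswith f "public/" ||
          PySem.Str.endswith f ".js" || PySem.Str.endswith f ".ts" then 1
  else 0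

-- Python's max(map(_rank, files)) over a nonempty list; fold with seed 0 is exact since ranks are Nats
def pvMaxRank (files : List String) : Nat := (files.map pvRank).foldl Nat.max 0

def infer_fallback_subject_alt (files : List String) : String :=
  if files = [] then
    "chore: improve commit message quality for repository updates"
  else
    let subject :=
      if files.any (fun f => !(PySem.Str.endswith f ".md" || PySem.Str.startswith f "docs/")) then
        -- _SUBJECTS[max(...)]; the index is always < 4 so the default is never used
        PySem.List.pyGetD pvSubjects (pvMaxRank files) ""
      else "docs: expand documentation details for recent changes"
    let first_file := PySem.List.pyGetD files 0 ""
    let subject :=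
      if PySem.Str.len first_file ≤ 28 then
        let suffix := PySem.Str.join "" [" (", first_file, ")"]
        if PySem.Str.len subject + PySem.Str.len suffix ≤ 72 then PySem.Str.join "" [subject, suffix]
        else subject
      else subject
    if PySem.Str.len subject > 72 then PySem.Str.rstrip (PySem.Str.slice subject none (some 72))
    else subject

-- ===== PRECONDITION & SPEC =====
def Spec_infer_fallback_subject (files : List String) (out : String) : Prop := out = infer_fallback_subject_alt files
instance (files : List String) (out : String) : Decidable (Spec_infer_fallback_subject files out) := by unfold Spec_infer_fallback_subject; infer_instance

-- ===== CLAIM (what is proved, stated in full; the proofs are below) =====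
def Claim_equal_infer_fallback_subject : Prop := ∀ (files : List String), Dom_infer_fallback_subject files → Spec_infer_fallback_subject files (infer_fallback_subject files)

-- ===== LEMMAS AND PROOFS =====

def pvCiP (f : String) : Bool := PySem.Str.startswith f ".github/"
def pvTestP (f : String) : Bool :=
  PySem.Str.startswith f "test/" || PySem.Str.startswith f "tests/" ||
  PySem.Str.endswith f ".spec.js" || PySem.Str.endswith f ".spec.ts" ||
  PySem.Str.endswith f ".test.js" || PySem.Str.endswith f ".test.ts"
def pvAppP (f : String) : Bool :=
  PySem.Str.startswith f "server/" || PySem.Str.startswith f "public/" ||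
  PySem.Str.endswith f ".js" || PySem.Str.endswith f ".ts"
def pvDocP (f : String) : Bool := PySem.Str.endswith f ".md" || PySem.Str.startswith f "docs/"

-- the identical suffix/truncation tail of both ports, factored for the proof
def pvTail (subject : String) (files : List String) : String :=
  let first_file := PySem.List.pyGetD files 0 ""
  let subject :=
    if PySem.Str.len first_file ≤ 28 then
      let suffix := PySem.Str.join "" [" (", first_file, ")"]
      if PySem.Str.len subject + PySem.Str.len suffix ≤ 72 then PySem.Str.join "" [subject, suffix]
      else subject
    else subject
  if PySem.Str.len subject > 72 then PySem.Str.rstrip (PySem.Str.slice subject none (some 72))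
  else subject

def pvSubjA (files : List String) : String :=
  if files.all pvDocP then "docs: expand documentation details for recent changes"
  else if files.any pvCiP then "Refine automation to enforce better commit messages"
  else if files.any pvTestP then "test: improve test coverage for recent code updates"
  else if files.any pvAppP then "feat: improve application behavior in updated modules"
  else "chore: organize and describe repository file updates"

def pvSubjB (files : List String) : String :=
  if files.any (fun f => !(PySem.Str.endswith f ".md" || PySem.Str.startswith f "docs/")) then
    PySem.List.pyGetD pvSubjects (pvMaxRank files) ""
  else "docs: expand documentation details for recent changes"

theorem A_eq_tail (files : List String) (h : ¬ files = []) :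
    infer_fallback_subject files = pvTail (pvSubjA files) files := by
  rw [infer_fallback_subject, if_neg h]; rfl

theorem B_eq_tail (files : List String) (h : ¬ files = []) :
    infer_fallback_subject_alt files = pvTail (pvSubjB files) files := by
  rw [infer_fallback_subject_alt, if_neg h]; rfl

theorem rank3 (f : String) : decide (3 ≤ pvRank f) = pvCiP f := by
  unfold pvRank pvCiP; split_ifs with h1 h2 h3 <;> simp_all

theorem rank2 (f : String) : decide (2 ≤ pvRank f) = (pvCiP f || pvTestP f) := by
  unfold pvRank pvCiP pvTestP; split_ifs with h1 h2 h3 <;> simp_all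

theorem rank1 (f : String) : decide (1 ≤ pvRank f) = (pvCiP f || pvTestP f || pvAppP f) := by
  unfold pvRank pvCiP pvTestP pvAppP; split_ifs with h1 h2 h3 <;> simp_all

theorem rank_le3 (f : String) : pvRank f ≤ 3 := by
  unfold pvRank; split_ifs <;> omega

theorem foldl_max_le3 (l : List String) (k : Nat) (hk : k ≤ 3) :
    (l.map pvRank).foldl Nat.max k ≤ 3 := by
  induction l generalizing k with
  | nil => simpa using hk
  | cons g t ih =>
    simp only [List.map, List.foldl]
    exact ih _ (Nat.max_le.mpr ⟨hk, rank_le3 g⟩)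

theorem maxRank_le3 (files : List String) : pvMaxRank files ≤ 3 :=
  foldl_max_le3 files 0 (by omega)

theorem maxRank_le_iff (files : List String) (n k : Nat) :
    (n ≤ (files.map pvRank).foldl Nat.max k) ↔ (n ≤ k ∨ files.any (fun f => decide (n ≤ pvRank f)) = true) := by
  induction files generalizing k with
  | nil => simp
  | cons f rest ih =>
    rw [List.map_cons, List.foldl_cons, ih, List.any_cons]
    simp only [Bool.or_eq_true, decide_eq_true_iff, Nat.max_def]
    split_ifs with h <;> cases hx : rest.any (fun f => decide (n ≤ pvRank f)) <;>
      simp only [hx, Bool.false_eq_true, or_false, or_true, iff_true, false_or] <;>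
      first | omega | (constructor <;> intro h' <;> omega)

theorem maxRank3 (files : List String) :
    (3 ≤ pvMaxRank files) ↔ files.any pvCiP = true := by
  rw [pvMaxRank, maxRank_le_iff]
  simp only [rank3]
  simp

theorem maxRank2 (files : List String) :
    (2 ≤ pvMaxRank files) ↔ files.any (fun f => pvCiP f || pvTestP f) = true := by
  rw [pvMaxRank, maxRank_le_iff]
  simp only [rank2]
  simp

theorem maxRank1 (files : List String) :
    (1 ≤ pvMaxRank files) ↔ files.any (fun f => pvCiP f || pvTestP f || pvAppP f) = true := by
  rw [pvMaxRank, maxRank_le_iff]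
  simp only [rank1]
  simp

theorem any_or (l : List String) (p q : String → Bool) :
    l.any (fun f => p f || q f) = (l.any p || l.any q) := by
  induction l with
  | nil => rfl
  | cons a t ih =>
    simp only [List.any_cons, ih]
    cases p a <;> cases q a <;> cases t.any p <;> cases t.any q <;> rfl

-- the table lookup at the max rank equals A's elif chain
theorem table_eq_chain (files : List String) :
    PySem.List.pyGetD pvSubjects (pvMaxRank files) "" =
      (if files.any pvCiP then "Refine automation to enforce better commit messages"
       else if files.any pvTestP then "test: improve test coverage for recent code updates"
       else if files.any pvAppP then "feat: improve application behavior in updated modules"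
       else "chore: organize and describe repository file updates") := by
  have hle := maxRank_le3 files
  by_cases hci : files.any pvCiP = true
  · have hm : pvMaxRank files = 3 := by have := (maxRank3 files).mpr hci; omega
    rw [hm, if_pos hci]; rfl
  · have hcif : files.any pvCiP = false := by simpa using hci
    rw [if_neg hci]
    by_cases ht : files.any pvTestP = true
    · have hm : pvMaxRank files = 2 := by
        have h2 : 2 ≤ pvMaxRank files := (maxRank2 files).mpr (by rw [any_or, hcif, ht]; rfl)
        have h3 : ¬ 3 ≤ pvMaxRank files := fun h => hci ((maxRank3 files).mp h)
        omega
      rw [hm, if_pos ht]; rfl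
    · have htf : files.any pvTestP = false := by simpa using ht
      rw [if_neg ht]
      by_cases ha : files.any pvAppP = true
      · have hm : pvMaxRank files = 1 := by
          have h1 : 1 ≤ pvMaxRank files := (maxRank1 files).mpr (by rw [any_or, any_or, hcif, htf, ha]; rfl)
          have h2 : ¬ 2 ≤ pvMaxRank files := fun h => by
            have := (maxRank2 files).mp h; rw [any_or, hcif, htf] at this; exact absurd this (by simp)
          omega
        rw [hm, if_pos ha]; rfl
      · have haf : files.any pvAppP = false := by simpa using ha
        have hm : pvMaxRank files = 0 := by
          have h1 : ¬ 1 ≤ pvMaxRank files := fun h => by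
            have := (maxRank1 files).mp h
            rw [any_or, any_or, hcif, htf, haf] at this; exact absurd this (by simp)
          omega
        rw [hm, if_neg ha]; rfl

theorem any_not_docP (l : List String) :
    l.any (fun f => !(PySem.Str.endswith f ".md" || PySem.Str.startswith f "docs/")) = !l.all pvDocP := by
  induction l with
  | nil => rfl
  | cons a t ih =>
    rw [List.any_cons, List.all_cons, ih, Bool.not_and]
    rfl

theorem subj_eq (files : List String) : pvSubjA files = pvSubjB files := by
  unfold pvSubjA pvSubjB
  rw [any_not_docP]
  cases hd : files.all pvDocP
  · rw [table_eq_chain]; simp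
  · simp

-- ===== VERDICT (by name: the statement is the Claim_ definition above) =====
theorem infer_fallback_subject_spec : Claim_equal_infer_fallback_subject := by
  intro files _
  unfold Spec_infer_fallback_subject
  by_cases hnil : files = []
  · rw [hnil]; rfl
  · rw [A_eq_tail files hnil, B_eq_tail files hnil, subj_eq]
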